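-- pv_equiv track=rewrite | github.com/ruslanraupoff/leetcode | 2021/06/11/main.py | stoneGameVII
-- ===== SOURCE A (Python) =====
-- from typing import List
--
-- def stoneGameVII(stones: List[int]) -> int:
--     d = len(stones)
--     dp = [[0] * d for _ in range(d)]
--     for i in range(d-1, -1, -1):
--         sm = stones[i]
--         for j in range(i+1, d):
--             sm += stones[j]
--             dp[i][j] = max(sm-stones[i]-dp[i+1][j], sm-stones[j]-dp[i][j-1])
--     return dp[0][-1]
-- ===== SOURCE B (Python) =====
-- from typing import List
--
-- def stoneGameVII(stones: List[int]) -> int: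
--     # Top-down memoized recursion over intervals with a prefix-sum array
--     # (A fills a full d x d bottom-up table with a running interval sum).
--     d = len(stones)
--     P = [0] * (d + 1)
--     for k in range(d):
--         P[k + 1] = P[k] + stones[k]
--     memo = {}
--
--     def solve(i, j):
--         if i == j:
--             return 0
--         if (i, j) not in memo:
--             memo[(i, j)] = max((P[j + 1] - P[i + 1]) - solve(i + 1, j),
--                                (P[j] - P[i]) - solve(i, j - 1))
--         return memo[(i, j)]
--
--     return solve(0, d - 1)
-- ===== Notes on version B (the rewrite author's own statement) =====
-- stated objective: alternative
-- what changed: replaces A's bottom-up d x d table filled row by row with a running interval sum by top-down memoized recursion solve(i,j) over a precomputed prefix-sum array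
import Mathlib
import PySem

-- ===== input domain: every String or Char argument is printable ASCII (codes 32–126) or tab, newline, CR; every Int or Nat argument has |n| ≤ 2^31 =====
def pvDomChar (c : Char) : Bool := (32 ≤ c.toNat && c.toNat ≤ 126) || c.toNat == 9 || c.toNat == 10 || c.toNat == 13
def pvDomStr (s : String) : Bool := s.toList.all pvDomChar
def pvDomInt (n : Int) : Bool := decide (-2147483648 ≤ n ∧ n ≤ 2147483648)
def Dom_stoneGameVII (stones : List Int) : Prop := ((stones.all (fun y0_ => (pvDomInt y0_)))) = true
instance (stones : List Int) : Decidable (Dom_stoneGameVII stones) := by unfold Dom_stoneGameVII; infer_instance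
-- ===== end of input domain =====

-- B replaces A's bottom-up d×d table filled with running interval sums by top-down memoized
-- recursion solve(i, j) over a precomputed prefix-sum array (objective: alternative).

-- ===== PORT A =====
-- dp[i][j] read/write; indices are always in range in A, so getD 0 / set are exact there
def pvGet2 (dp : List (List Int)) (i j : Nat) : Int := (dp.getD i []).getD j 0
def pvSet2 (dp : List (List Int)) (i j : Nat) (v : Int) : List (List Int) :=
  dp.set i ((dp.getD i []).set j v)

-- body of A's inner 'for j in range(i+1, d)' loop (stones[i], stones[j] always in range: getD 0 exact)
def pvInnerA (stones : List Int) (i : Nat) (st : Int × List (List Int)) (j : Nat) :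
    Int × List (List Int) :=
  let sm := st.1 + stones.getD j 0
  (sm, pvSet2 st.2 i j (max (sm - stones.getD i 0 - pvGet2 st.2 (i+1) j)
                            (sm - stones.getD j 0 - pvGet2 st.2 i (j-1))))

def stoneGameVII (stones : List Int) : Int :=
  let d := stones.length
  let dp0 : List (List Int) := List.replicate d (List.replicate d 0)
  let dp := ((List.range d).reverse).foldl
    (fun dp i =>
      ((List.range' (i+1) (d - (i+1))).foldl (pvInnerA stones i) (stones.getD i 0, dp)).2)
    dp0
  -- dp[0][-1]; pyGet? = none is Python's IndexError (stones = [], excluded by Pre_)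
  ((PySem.List.pyGet? dp 0).bind (fun row => PySem.List.pyGet? row (-1))).getD 0

-- ===== PORT B =====
-- P = [0]*(d+1); for k in range(d): P[k+1] = P[k] + stones[k]   (all indices in range: getD/set exact)
def pvPrefixB (stones : List Int) : List Int :=
  (List.range stones.length).foldl
    (fun P k => P.set (k+1) (P.getD k 0 + stones.getD k 0))
    (List.replicate (stones.length + 1) 0)

-- solve(i, j): the memo dict is a pure cache (it never changes a returned value), so the port is
-- the recursion itself; indices are Nats since every reachable call has 0 ≤ i ≤ j.  The final
-- 'else 0' branch (j < i) is a totality guard only: it is unreachable from solve(0, d-1), d ≥ 1.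
def pvSolveB (P : List Int) (i j : Nat) : Int :=
  if i = j then 0
  else if i < j then
    max ((P.getD (j+1) 0 - P.getD (i+1) 0) - pvSolveB P (i+1) j)
        ((P.getD j 0 - P.getD i 0) - pvSolveB P i (j-1))
  else 0
termination_by j - i
decreasing_by all_goals omega

def stoneGameVII_alt (stones : List Int) : Int :=
  -- solve(0, d-1); in Python this raises IndexError for stones = [] (excluded by Pre_)
  pvSolveB (pvPrefixB stones) 0 (stones.length - 1)

-- ===== PRECONDITION & SPEC =====
-- Pre_ excludes only the empty list, on which both Pythons raise IndexError.
def Pre_stoneGameVII (stones : List Int) : Prop := stones ≠ []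
instance (stones : List Int) : Decidable (Pre_stoneGameVII stones) := by
  unfold Pre_stoneGameVII; infer_instance
def pvWitness_stoneGameVII : List Int := [5, 3, 1, 4, 2]

def Spec_stoneGameVII (stones : List Int) (out : Int) : Prop := out = stoneGameVII_alt stones
instance (stones : List Int) (out : Int) : Decidable (Spec_stoneGameVII stones out) := by
  unfold Spec_stoneGameVII; infer_instance

-- ===== CLAIM (what is proved, stated in full; the proofs are below) =====
def Claim_equal_stoneGameVII : Prop := ∀ (stones : List Int), Dom_stoneGameVII stones →
  Pre_stoneGameVII stones → Spec_stoneGameVII stones (stoneGameVII stones)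

-- ===== LEMMAS AND PROOFS =====

-- sum of stones[a..b-1], via prefix sums
def pvS (st : List Int) (a b : Nat) : Int := (st.take b).sum - (st.take a).sum

-- the optimal score difference on the interval [i, j] (the value both programs compute)
def pvV (st : List Int) (i j : Nat) : Int :=
  if j ≤ i then 0
  else max (pvS st (i+1) (j+1) - pvV st (i+1) j) (pvS st i j - pvV st i (j-1))
termination_by j - i
decreasing_by all_goals omega

lemma pvV_of_le (st : List Int) {i j : Nat} (h : j ≤ i) : pvV st i j = 0 := by
  rw [pvV]; simp [h]

lemma pvV_of_lt (st : List Int) {i j : Nat} (h : i < j) :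
    pvV st i j = max (pvS st (i+1) (j+1) - pvV st (i+1) j) (pvS st i j - pvV st i (j-1)) := by
  rw [pvV]; simp [Nat.not_le.2 h]

lemma take_sum_succ (st : List Int) {k : Nat} (h : k < st.length) :
    (st.take (k+1)).sum = (st.take k).sum + st.getD k 0 := by
  rw [List.getD_eq_getElem _ _ (by simpa using h)]
  rw [List.take_add_one, List.sum_append]
  rw [List.getElem?_eq_getElem h]
  simp

lemma getD_map_range' {α : Type} (n : Nat) (f : Nat → α) (a : Nat) (d : α) :
    ((List.range n).map f).getD a d = if a < n then f a else d := by
  rcases Nat.lt_or_ge a n with h|h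
  · rw [List.getD_eq_getElem _ _ (by simpa using h)]; simp [h]
  · rw [List.getD_eq_default _ _ (by simpa using h)]; simp [Nat.not_lt.2 h]

-- ==== A-side invariant machinery ====

-- the dp table with rows > i complete, row i filled for columns i+1..c, rows < i untouched
def pvPart (st : List Int) (d i c : Nat) : List (List Int) :=
  (List.range d).map (fun a => (List.range d).map (fun b =>
    if (i < a ∨ (a = i ∧ b ≤ c)) ∧ a < b then pvV st a b else 0))

-- the dp table with rows ≥ i complete
def pvFull (st : List Int) (d i : Nat) : List (List Int) :=
  (List.range d).map (fun a => (List.range d).map (fun b =>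
    if i ≤ a ∧ a < b then pvV st a b else 0))

lemma pvPart_start (st : List Int) (d i : Nat) : pvPart st d i i = pvFull st d (i+1) := by
  unfold pvPart pvFull
  apply List.map_congr_left; intro a _
  apply List.map_congr_left; intro b _
  exact if_congr (by omega) rfl rfl

lemma pvPart_finish (st : List Int) (d i : Nat) (hd : 0 < d) :
    pvPart st d i (d-1) = pvFull st d i := by
  unfold pvPart pvFull
  apply List.map_congr_left; intro a _
  apply List.map_congr_left; intro b hb
  have hb' : b < d := List.mem_range.mp hb
  exact if_congr (by omega) rfl rfl

lemma pvFull_init (st : List Int) (d : Nat) :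
    List.replicate d (List.replicate d (0:Int)) = pvFull st d d := by
  unfold pvFull
  have h1 : ∀ a ∈ List.range d, ((List.range d).map (fun b =>
      if d ≤ a ∧ a < b then pvV st a b else 0)) = List.replicate d (0:Int) := by
    intro a ha
    have ha' : a < d := List.mem_range.mp ha
    have h2 : ∀ b ∈ List.range d, (if d ≤ a ∧ a < b then pvV st a b else (0:Int)) = 0 := by
      intro b _
      rw [if_neg (by omega : ¬ (d ≤ a ∧ a < b))]
    rw [List.map_congr_left h2]
    simp
  rw [List.map_congr_left h1]
  simp

lemma pvGet2_pvPart (st : List Int) (d i c a b : Nat) (ha : a < d) (hb : b < d) :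
    pvGet2 (pvPart st d i c) a b =
      if (i < a ∨ (a = i ∧ b ≤ c)) ∧ a < b then pvV st a b else 0 := by
  unfold pvGet2 pvPart
  rw [getD_map_range', if_pos ha, getD_map_range', if_pos hb]

lemma pvSet2_pvPart (st : List Int) (d i c : Nat) (hi : i < d) (hc : i ≤ c) (hcd : c + 1 < d) :
    pvSet2 (pvPart st d i c) i (c+1) (pvV st i (c+1)) = pvPart st d i (c+1) := by
  unfold pvSet2 pvPart
  have hrow : ((List.range d).map (fun a => (List.range d).map (fun b =>
      if (i < a ∨ (a = i ∧ b ≤ c)) ∧ a < b then pvV st a b else 0))).getD i [] =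
      (List.range d).map (fun b => if (i < i ∨ (i = i ∧ b ≤ c)) ∧ i < b then pvV st i b else 0) := by
    rw [getD_map_range', if_pos hi]
  rw [hrow]
  apply List.ext_getElem
  · simp
  · intro a h1 h2
    have had : a < d := by simpa using h2
    by_cases hai : i = a
    · subst hai
      rw [List.getElem_set_self (by simpa using hi)]
      rw [List.getElem_map, List.getElem_range (by simpa using had)]
      apply List.ext_getElem
      · simp
      · intro b hb1 hb2
        have hbd : b < d := by simpa using hb2
        by_cases hbc : c + 1 = b
        · subst hbc
          rw [List.getElem_set_self (by simpa using hcd)]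
          rw [List.getElem_map, List.getElem_range (by simpa using hbd)]
          rw [if_pos (by omega : (i < i ∨ (i = i ∧ c+1 ≤ c+1)) ∧ i < c+1)]
        · rw [List.getElem_set_ne hbc]
          rw [List.getElem_map, List.getElem_range (by simpa using hbd),
              List.getElem_map, List.getElem_range (by simpa using hbd)]
          exact if_congr (by omega) rfl rfl
    · rw [List.getElem_set_ne hai]
      rw [List.getElem_map, List.getElem_range (by simpa using had),
          List.getElem_map, List.getElem_range (by simpa using had)]
      apply List.map_congr_left; intro b _
      exact if_congr (by omega) rfl rfl

lemma pvInnerA_step (st : List Int) (d i j : Nat) (hd : d = st.length)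
    (hij : i < j) (hjd : j < d) :
    pvInnerA st i (pvS st i j, pvPart st d i (j-1)) j = (pvS st i (j+1), pvPart st d i j) := by
  have hid : i < d := lt_trans hij hjd
  have hsm : pvS st i j + st.getD j 0 = pvS st i (j+1) := by
    unfold pvS
    rw [take_sum_succ st (by omega)]
    ring
  have hg1 : pvGet2 (pvPart st d i (j-1)) (i+1) j = pvV st (i+1) j := by
    rw [pvGet2_pvPart st d i (j-1) (i+1) j (by omega) hjd]
    by_cases h : i + 1 < j
    · rw [if_pos (by omega : (i < i+1 ∨ (i+1 = i ∧ j ≤ j-1)) ∧ i+1 < j)]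
    · rw [if_neg (by omega : ¬ ((i < i+1 ∨ (i+1 = i ∧ j ≤ j-1)) ∧ i+1 < j)),
          pvV_of_le st (by omega)]
  have hg2 : pvGet2 (pvPart st d i (j-1)) i (j-1) = pvV st i (j-1) := by
    rw [pvGet2_pvPart st d i (j-1) i (j-1) hid (by omega)]
    by_cases h : i < j - 1
    · rw [if_pos (by omega : (i < i ∨ (i = i ∧ j-1 ≤ j-1)) ∧ i < j-1)]
    · rw [if_neg (by omega : ¬ ((i < i ∨ (i = i ∧ j-1 ≤ j-1)) ∧ i < j-1)),
          pvV_of_le st (by omega)]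
  have hsub1 : pvS st i (j+1) - st.getD i 0 = pvS st (i+1) (j+1) := by
    unfold pvS
    rw [take_sum_succ st (by omega : i < st.length)]
    ring
  have hsub2 : pvS st i (j+1) - st.getD j 0 = pvS st i j := by
    unfold pvS
    rw [take_sum_succ st (by omega : j < st.length)]
    ring
  have hset := pvSet2_pvPart st d i (j-1) hid (by omega) (by omega)
  have hj1 : j - 1 + 1 = j := by omega
  rw [hj1] at hset
  simp only [pvInnerA]
  rw [hsm, hsub1, hsub2, hg1, hg2, ← pvV_of_lt st hij, hset]

lemma pvInnerA_fold (st : List Int) (d i : Nat) (hd : d = st.length) (_hid : i < d) :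
    ∀ t, i + t < d →
    (List.range' (i+1) t).foldl (pvInnerA st i) (pvS st i (i+1), pvPart st d i i)
      = (pvS st i (i+1+t), pvPart st d i (i+t)) := by
  intro t
  induction t with
  | zero => intro _; simp
  | succ m ih =>
    intro h
    have hr : List.range' (i+1) (m+1) = List.range' (i+1) m ++ [i+1+m] := by
      simpa using List.range'_concat (s := i+1) (n := m) (step := 1)
    rw [hr, List.foldl_append, ih (by omega)]
    simp only [List.foldl_cons, List.foldl_nil]
    have hstep := pvInnerA_step st d i (i+1+m) hd (by omega) (by omega)
    have he1 : i + 1 + m - 1 = i + m := by omega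
    rw [he1] at hstep
    have he2 : i + 1 + m = i + (m+1) := by omega
    rw [he2] at hstep
    rw [he2, hstep]
    have he3 : i + (m+1) + 1 = i + 1 + (m+1) := by omega
    rw [he3]

lemma pvOuter_fold (st : List Int) (d : Nat) (hd : d = st.length) :
    ∀ k, k ≤ d →
    ((List.range k).reverse).foldl
      (fun dp i =>
        ((List.range' (i+1) (d - (i+1))).foldl (pvInnerA st i) (st.getD i 0, dp)).2)
      (pvFull st d k) = pvFull st d 0 := by
  intro k
  induction k with
  | zero => intro _; simp
  | succ m ih =>
    intro h
    rw [List.range_succ, List.reverse_append]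
    simp only [List.reverse_cons, List.reverse_nil, List.nil_append, List.singleton_append,
      List.foldl_cons]
    have hstart : st.getD m 0 = pvS st m (m+1) := by
      unfold pvS
      rw [take_sum_succ st (by omega : m < st.length)]
      ring
    rw [hstart, ← pvPart_start st d m]
    rw [pvInnerA_fold st d m hd (by omega) (d - (m+1)) (by omega)]
    have : m + (d - (m+1)) = d - 1 := by omega
    rw [this, pvPart_finish st d m (by omega)]
    exact ih (by omega)

lemma stoneGameVII_eq_pvV (st : List Int) (h : st ≠ []) :
    stoneGameVII st = pvV st 0 (st.length - 1) := by
  have hd : 0 < st.length := List.length_pos_iff.mpr h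
  unfold stoneGameVII
  simp only
  rw [pvFull_init st st.length,
      pvOuter_fold st st.length rfl st.length (le_refl _)]
  have hrow : PySem.List.pyGet? (pvFull st st.length 0) 0 =
      some ((List.range st.length).map (fun b => if 0 ≤ 0 ∧ 0 < b then pvV st 0 b else 0)) := by
    unfold pvFull
    rw [PySem.List.pyGet?_zero]
    rw [List.getElem?_map, List.getElem?_range hd]
    rfl
  rw [hrow]
  simp only [Option.bind_some]
  rw [PySem.List.pyGet?_neg_one]
  rw [List.getLast?_eq_getElem?]
  simp only [List.length_map, List.length_range]
  rw [List.getElem?_map, List.getElem?_range (by omega : st.length - 1 < st.length)]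
  simp only [Option.map_some, Option.getD_some]
  by_cases h1 : st.length = 1
  · have : st.length - 1 = 0 := by omega
    rw [this]
    simp [pvV_of_le st (le_refl 0)]
  · have : 0 ≤ 0 ∧ 0 < st.length - 1 := by omega
    rw [if_pos this]

-- ==== B-side invariant machinery ====

-- the prefix array after the first m iterations of B's build loop
def pvPB (st : List Int) (m : Nat) : List Int :=
  (List.range (st.length + 1)).map (fun k => if k ≤ m then (st.take k).sum else 0)

lemma pvPB_zero (st : List Int) : List.replicate (st.length + 1) (0:Int) = pvPB st 0 := by
  unfold pvPB
  have h : ∀ k ∈ List.range (st.length + 1),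
      (if k ≤ 0 then (st.take k).sum else (0:Int)) = 0 := by
    intro k _
    by_cases hk : k ≤ 0
    · have : k = 0 := by omega
      simp [this]
    · simp [hk]
  rw [List.map_congr_left h]
  simp

lemma pvPB_step (st : List Int) (m : Nat) (hm : m < st.length) :
    (pvPB st m).set (m+1) ((pvPB st m).getD m 0 + st.getD m 0) = pvPB st (m+1) := by
  have hg : (pvPB st m).getD m 0 = (st.take m).sum := by
    unfold pvPB
    rw [getD_map_range', if_pos (by omega), if_pos (le_refl m)]
  rw [hg]
  unfold pvPB
  apply List.ext_getElem
  · simp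
  · intro k h1 h2
    have hk : k < st.length + 1 := by simpa using h2
    by_cases hkm : m + 1 = k
    · subst hkm
      rw [List.getElem_set_self (by simpa using hk)]
      rw [List.getElem_map, List.getElem_range (by simpa using hk)]
      rw [if_pos (le_refl (m+1)), take_sum_succ st hm]
    · rw [List.getElem_set_ne hkm]
      rw [List.getElem_map, List.getElem_range (by simpa using hk),
          List.getElem_map, List.getElem_range (by simpa using hk)]
      exact if_congr (by omega) rfl rfl

lemma pvPrefixB_eq (st : List Int) : pvPrefixB st = pvPB st st.length := by
  unfold pvPrefixB
  rw [pvPB_zero st]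
  have h : ∀ m, m ≤ st.length →
      (List.range m).foldl
        (fun P k => P.set (k+1) (P.getD k 0 + st.getD k 0)) (pvPB st 0) = pvPB st m := by
    intro m
    induction m with
    | zero => intro _; simp
    | succ m ih =>
      intro hm
      rw [List.range_succ, List.foldl_append, ih (by omega)]
      simp only [List.foldl_cons, List.foldl_nil]
      exact pvPB_step st m (by omega)
  exact h st.length (le_refl _)

lemma pvPrefixB_getD (st : List Int) (k : Nat) (hk : k ≤ st.length) :
    (pvPrefixB st).getD k 0 = (st.take k).sum := by
  rw [pvPrefixB_eq]
  unfold pvPB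
  rw [getD_map_range', if_pos (by omega), if_pos hk]

lemma pvSolveB_eq (st : List Int) :
    ∀ n i j, j - i ≤ n → i ≤ j → j < st.length →
    pvSolveB (pvPrefixB st) i j = pvV st i j := by
  intro n
  induction n with
  | zero =>
    intro i j hn hij _
    have : i = j := by omega
    subst this
    rw [pvSolveB, if_pos rfl, pvV_of_le st (le_refl i)]
  | succ n ih =>
    intro i j hn hij hjd
    by_cases hij' : i = j
    · subst hij'
      rw [pvSolveB, if_pos rfl, pvV_of_le st (le_refl i)]
    · have hlt : i < j := by omega
      rw [pvSolveB, if_neg hij', if_pos hlt]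
      rw [pvPrefixB_getD st (j+1) (by omega), pvPrefixB_getD st (i+1) (by omega),
          pvPrefixB_getD st j (by omega), pvPrefixB_getD st i (by omega)]
      rw [ih (i+1) j (by omega) hlt hjd, ih i (j-1) (by omega) (by omega) (by omega)]
      rw [pvV_of_lt st hlt]
      unfold pvS
      rfl

lemma stoneGameVII_alt_eq_pvV (st : List Int) (h : st ≠ []) :
    stoneGameVII_alt st = pvV st 0 (st.length - 1) := by
  have hd : 0 < st.length := List.length_pos_iff.mpr h
  unfold stoneGameVII_alt
  exact pvSolveB_eq st (st.length - 1) 0 (st.length - 1) (by omega) (by omega) (by omega)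

-- ===== VERDICT (by name: the statement is the Claim_ definition above) =====
theorem stoneGameVII_spec : Claim_equal_stoneGameVII := by
  intro stones _ hpre
  unfold Spec_stoneGameVII
  rw [stoneGameVII_eq_pvV stones hpre, stoneGameVII_alt_eq_pvV stones hpre]
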